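-- pv_equiv track=rewrite | github.com/yasufumi-nakata/Pytra | test/fixtures/control/loop.py | calc_17
-- ===== SOURCE A (Python) =====
-- def calc_17(values: list[int]) -> int:
--     total: int = 0
--     for v in values:
--         if v % 2 == 0:
--             total += v
--         else:
--             total += v * 2
--     return total
-- ===== SOURCE B (Python) =====
-- def calc_17(values: list[int]) -> int:
--     # every value counted once, odd values counted a second time
--     return sum(values) + sum(v for v in values if v % 2)
-- ===== Notes on version B (the rewrite author's own statement) =====
-- stated objective: simpler
-- what changed: Replaces the single accumulator loop with an if/else by sum(values) plus a filtered sum of the odd values, using that doubling an odd value equals adding it twice.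
import Mathlib
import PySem

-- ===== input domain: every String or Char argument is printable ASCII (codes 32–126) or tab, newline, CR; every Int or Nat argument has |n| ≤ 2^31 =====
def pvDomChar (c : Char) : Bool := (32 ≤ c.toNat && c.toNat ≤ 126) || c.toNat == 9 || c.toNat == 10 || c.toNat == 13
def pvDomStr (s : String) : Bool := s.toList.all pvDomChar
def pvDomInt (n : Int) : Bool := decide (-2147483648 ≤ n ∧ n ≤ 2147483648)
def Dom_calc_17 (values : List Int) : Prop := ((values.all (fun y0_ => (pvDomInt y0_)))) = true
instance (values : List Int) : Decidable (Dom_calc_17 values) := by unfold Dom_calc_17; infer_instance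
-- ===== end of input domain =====

-- ===== PORT A =====
def calc_17 (values : List Int) : Int :=
  values.foldl (fun total v => if PySem.Int.mod v 2 == 0 then total + v else total + v * 2) 0

-- ===== PORT B =====
-- one honest line: B computes sum(values) + sum of odd values (doubling odd = adding twice); simpler decomposition
def calc_17_alt (values : List Int) : Int :=
  values.sum + (values.filter (fun v => PySem.Int.mod v 2 != 0)).sum

-- ===== PRECONDITION & SPEC =====
def Spec_calc_17 (values : List Int) (out : Int) : Prop := out = calc_17_alt values
instance (values : List Int) (out : Int) : Decidable (Spec_calc_17 values out) := by unfold Spec_calc_17; infer_instance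

-- ===== CLAIM (what is proved, stated in full; the proofs are below) =====
def Claim_equal_calc_17 : Prop := ∀ (values : List Int), Dom_calc_17 values → Spec_calc_17 values (calc_17 values)

-- ===== LEMMAS AND PROOFS =====

-- ===== VERDICT (by name: the statement is the Claim_ definition above) =====
theorem calc_17_key (values : List Int) (acc : Int) :
    values.foldl (fun total v => if PySem.Int.mod v 2 == 0 then total + v else total + v * 2) acc
      = acc + values.sum + (values.filter (fun v => PySem.Int.mod v 2 != 0)).sum := by
  induction values generalizing acc with
  | nil => simp
  | cons v vs ih =>
    simp only [List.foldl_cons, List.filter_cons, List.sum_cons, ih]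
    rw [PySem.Int.mod_eq_emod_of_pos (b := 2) (by omega)]
    rcases Int.emod_two_eq v with h | h <;> simp [h] <;> ring

theorem calc_17_spec : Claim_equal_calc_17 := by
  intro values _
  unfold Spec_calc_17 calc_17 calc_17_alt
  rw [calc_17_key]; ring
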